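-- pv_equiv track=rewrite | github.com/sangyoung216/programmers | 프로그래머스/0/181864. 문자열 바꿔서 찾기/문자열 바꿔서 찾기.py | solution
-- ===== SOURCE A (Python) =====
-- def solution(myString, pat):
--     myList = list(myString)
--     for i in range(len(myList)):
--         if(myList[i] == 'A'):
--             myList[i] = 'B'
--         elif(myList[i] == 'B'):
--             myList[i] = 'A'
--
--     rev_String = "".join(myList)
--     if(pat in rev_String):
--         answer = 1
--     else:
--         answer = 0
--     return answer
-- ===== SOURCE B (Python) =====
-- def solution(myString, pat):
--     # Direct index-based naive substring search with a swap-aware character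
--     # comparator: no transformed string is ever built, no library search used.
--     n, m = len(myString), len(pat)
--     for i in range(n - m + 1):
--         j = 0
--         while j < m:
--             a = myString[i + j]
--             sw = 'B' if a == 'A' else 'A' if a == 'B' else a
--             if sw != pat[j]:
--                 break
--             j += 1
--         else:
--             return 1
--     return 0
-- ===== Notes on version B (the rewrite author's own statement) =====
-- stated objective: alternative
-- what changed: B never builds a swapped string: it runs an explicit index-based naive substring search (outer loop over start positions, inner loop comparing characters through a swap-aware comparator), instead of A's rewrite-the-whole-string pass followed by a library 'in' search.
import Mathlib
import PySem

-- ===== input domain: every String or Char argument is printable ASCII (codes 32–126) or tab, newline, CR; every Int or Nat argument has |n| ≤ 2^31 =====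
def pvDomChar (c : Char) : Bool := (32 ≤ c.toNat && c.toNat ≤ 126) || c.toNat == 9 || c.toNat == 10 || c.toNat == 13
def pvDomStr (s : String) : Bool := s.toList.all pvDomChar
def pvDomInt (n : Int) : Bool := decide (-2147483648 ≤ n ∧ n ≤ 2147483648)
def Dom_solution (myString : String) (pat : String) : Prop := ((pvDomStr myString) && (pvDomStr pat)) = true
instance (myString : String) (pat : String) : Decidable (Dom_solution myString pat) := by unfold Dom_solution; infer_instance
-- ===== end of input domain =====

-- B does an explicit naive substring search with a swap-aware character comparator, building no swapped string; alternative decomposition, same results.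

-- ===== PORT A =====
-- the in-place index loop over list(myString)
def pvStepA (l : List Char) (i : Int) : List Char :=
  if PySem.List.pyGetD l i ' ' = 'A' then l.set i.toNat 'B'
  else if PySem.List.pyGetD l i ' ' = 'B' then l.set i.toNat 'A'
  else l

def solution (myString : String) (pat : String) : Int :=
  let myList := myString.toList
  let myList := (PySem.List.pyRange 0 myList.length 1).foldl pvStepA myList
  let revString := String.ofList myList
  if PySem.Str.isIn pat revString then 1 else 0

-- ===== PORT B =====
-- Source B's inner while loop: compare pat against myString starting at i, char by char through the swap
def pvTry (s p : List Char) (i : Int) (j : Nat) : Bool :=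
  if h : j < p.length then
    let a := PySem.List.pyGetD s (i + j) ' '
    let sw := if a = 'A' then 'B' else if a = 'B' then 'A' else a
    if sw ≠ p[j] then false
    else pvTry s p i (j + 1)
  else true
termination_by p.length - j

def solution_alt (myString : String) (pat : String) : Int :=
  let s := myString.toList
  let p := pat.toList
  if (PySem.List.pyRange 0 ((s.length : Int) - p.length + 1) 1).any (fun i => pvTry s p i 0)
  then 1 else 0

-- ===== PRECONDITION & SPEC =====
def Spec_solution (myString : String) (pat : String) (out : Int) : Prop := out = solution_alt myString pat
instance (myString : String) (pat : String) (out : Int) : Decidable (Spec_solution myString pat out) := by unfold Spec_solution; infer_instance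

-- ===== CLAIM (what is proved, stated in full; the proofs are below) =====
def Claim_equal_solution : Prop := ∀ (myString : String) (pat : String), Dom_solution myString pat → Spec_solution myString pat (solution myString pat)

-- ===== LEMMAS AND PROOFS =====

def pvSwap (c : Char) : Char := if c = 'A' then 'B' else if c = 'B' then 'A' else c

-- loop invariant: after processing indices [0, k), the list is the swapped prefix ++ untouched suffix
theorem pvLoopA_inv (xs : List Char) (k : Nat) (h : k ≤ xs.length) :
    (PySem.List.pyRange (k : Int) (xs.length : Int) 1).foldl pvStepA
      ((xs.take k).map pvSwap ++ xs.drop k) = xs.map pvSwap := by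
  induction hd : xs.length - k generalizing k with
  | zero =>
      have hk : k = xs.length := by omega
      subst hk
      rw [PySem.List.pyRange_one_eq_nil (by omega)]
      simp
  | succ d ih =>
      have hk : k < xs.length := by omega
      rw [PySem.List.pyRange_one_cons (by exact_mod_cast hk)]
      have hdrop : xs.drop k = xs[k] :: xs.drop (k + 1) := List.drop_eq_getElem_cons hk
      have hlen : ((xs.take k).map pvSwap).length = k := by
        simp [List.length_take, Nat.min_eq_left (le_of_lt hk)]
      have hget : PySem.List.pyGetD ((xs.take k).map pvSwap ++ xs.drop k) (k : Int) ' ' = xs[k] := by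
        rw [PySem.List.pyGetD_natCast, List.getD_eq_getElem?_getD,
          List.getElem?_append_right hlen.le, hlen, Nat.sub_self, hdrop]
        simp [List.getElem?_eq_getElem hk]
      have hset : ∀ c : Char,
          ((xs.take k).map pvSwap ++ xs.drop k).set k c
            = (xs.take k).map pvSwap ++ c :: xs.drop (k + 1) := by
        intro c
        have hm : k - (min k xs.length) = 0 := by omega
        rw [List.set_append_right _ _ (by omega)]
        simp only [List.length_map, List.length_take, hm, hdrop, List.set_cons_zero]
      have hnext : (xs.take (k + 1)).map pvSwap ++ xs.drop (k + 1)
          = (xs.take k).map pvSwap ++ pvSwap xs[k] :: xs.drop (k + 1) := by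
        rw [List.take_add_one, List.getElem?_eq_getElem hk]
        simp only [Option.toList_some, List.map_append, List.map_cons, List.map_nil,
          List.append_assoc, List.cons_append, List.nil_append]
      have hstep : pvStepA ((xs.take k).map pvSwap ++ xs.drop k) (k : Int)
          = (xs.take (k + 1)).map pvSwap ++ xs.drop (k + 1) := by
        unfold pvStepA
        rw [hget, hnext]
        have : ((k : Int)).toNat = k := by simp
        rw [this]
        by_cases hA : xs[k] = 'A'
        · rw [if_pos hA, hset]; simp [pvSwap, hA]
        · rw [if_neg hA]
          by_cases hB : xs[k] = 'B'
          · rw [if_pos hB, hset]; simp [pvSwap, hB]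
          · rw [if_neg hB, hdrop]
            simp [pvSwap, hA, hB]
      simp only [List.foldl_cons, hstep]
      have : ((k : Int) + 1) = ((k + 1 : Nat) : Int) := by push_cast; ring
      rw [this]
      exact ih (k + 1) (by omega) (by omega)

-- A's loop is the character-wise swap of the whole string
theorem pvLoopA_eq_map (xs : List Char) :
    (PySem.List.pyRange 0 (xs.length : Int) 1).foldl pvStepA xs = xs.map pvSwap := by
  have := pvLoopA_inv xs 0 (Nat.zero_le _)
  simpa using this

-- B's inner loop succeeds from j exactly when the rest of p is a prefix of the swapped rest of s
theorem pvTry_iff (s p : List Char) (i j : Nat) (hin : i + p.length ≤ s.length) :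
    pvTry s p (i : Int) j = true ↔ p.drop j <+: (s.drop (i + j)).map pvSwap := by
  induction hd : p.length - j generalizing j with
  | zero =>
      have hj : p.length ≤ j := by omega
      rw [pvTry, dif_neg (by omega)]
      simp [List.drop_eq_nil_of_le hj]
  | succ d ih =>
      have hj : j < p.length := by omega
      have hij : i + j < s.length := by omega
      rw [pvTry, dif_pos hj]
      have hcast : (i : Int) + (j : Nat) = ((i + j : Nat) : Int) := by push_cast; ring
      have hget : PySem.List.pyGetD s ((i : Int) + j) ' ' = s[i + j] := by
        rw [hcast, PySem.List.pyGetD_natCast, List.getD_eq_getElem?_getD,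
          List.getElem?_eq_getElem hij]
        rfl
      have hdp : p.drop j = p[j] :: p.drop (j + 1) := List.drop_eq_getElem_cons hj
      have hds : s.drop (i + j) = s[i + j] :: s.drop (i + j + 1) := List.drop_eq_getElem_cons hij
      rw [hget, hdp, hds]
      simp only [List.map_cons, List.cons_prefix_cons]
      by_cases hc : (if s[i + j] = 'A' then 'B' else if s[i + j] = 'B' then 'A' else s[i + j]) = p[j]
      · rw [if_neg (by simpa using hc)]
        rw [ih (j + 1) (by omega)]
        have : i + (j + 1) = i + j + 1 := by omega
        rw [this]
        simp [pvSwap, hc]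
      · rw [if_pos (by simpa using hc)]
        simp only [Bool.false_eq_true, false_iff, not_and]
        intro heq
        exact absurd (by rw [heq]; rfl) hc

-- B's outer loop finds a match exactly when p is an infix of the swapped haystack
theorem pvAny_iff (s p : List Char) :
    (PySem.List.pyRange 0 ((s.length : Int) - p.length + 1) 1).any
      (fun i => pvTry s p i 0) = true ↔ p <:+: s.map pvSwap := by
  rw [List.any_eq_true]
  constructor
  · rintro ⟨i, hmem, htry⟩
    rw [PySem.List.mem_pyRange_one] at hmem
    obtain ⟨h0, hlt⟩ := hmem
    have hi : i = ((i.toNat : Nat) : Int) := by omega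
    have hbound : i.toNat + p.length ≤ s.length := by omega
    rw [hi] at htry
    have hpre := (pvTry_iff s p i.toNat 0 hbound).mp htry
    rw [List.infix_iff_prefix_suffix]
    refine ⟨(s.drop (i.toNat + 0)).map pvSwap, hpre, ?_⟩
    exact (List.drop_suffix _ _).map pvSwap
  · intro hinf
    obtain ⟨t, u, htu⟩ := hinf
    have hlen : t.length + p.length ≤ s.length := by
      have := congrArg List.length htu
      simp at this
      omega
    refine ⟨(t.length : Int), ?_, ?_⟩
    · rw [PySem.List.mem_pyRange_one]
      constructor
      · exact_mod_cast Nat.zero_le _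
      · omega
    · rw [pvTry_iff s p t.length 0 (by omega)]
      simp only [Nat.add_zero, List.drop_zero, List.map_drop, ← htu, List.append_assoc,
        List.drop_left]
      exact p.prefix_append u

-- ===== VERDICT (by name: the statement is the Claim_ definition above) =====
theorem solution_spec : Claim_equal_solution := by
  intro myString pat _
  unfold Spec_solution
  simp only [solution, solution_alt, pvLoopA_eq_map]
  by_cases h : pat.toList <:+: myString.toList.map pvSwap
  · rw [if_pos (by rw [PySem.Str.isIn_iff_infix]; simpa using h),
      if_pos ((pvAny_iff _ _).mpr h)]
  · rw [if_neg (fun hc => h (by simpa using (PySem.Str.isIn_iff_infix _ _).mp hc)),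
      if_neg (fun hc => h ((pvAny_iff _ _).mp hc))]
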